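-- pv_equiv track=rewrite | github.com/HaotianFrankZhang/Allocate-Protein-Hinges | PolB/Results/structure_demo/CheckLigands/class_readPDB.py | findAtoms
-- ===== SOURCE A (Python) =====
-- def findAtoms(line):
--     if line[0] == 'HETATM' or line[0] == 'ATOM':
--         position = 2
--     else:
--         position = 1
--     currAtom = line[position]
--     isNumber = False
--     Atom = ''
--     isAtom = True
--     Rest = ''
--
--     for char in currAtom:
--         if char.isalpha() and isNumber:
--             isAtom = False
--         if isAtom:
--             if char.isalpha() and not isNumber:
--                 Atom += char
--             if char.isnumeric():
--                 isNumber = True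
--                 Atom += char
--         else:
--             Rest += char
--     return Atom, Rest
-- ===== SOURCE B (Python) =====
-- def findAtoms(line):
--     if line[0] == 'HETATM' or line[0] == 'ATOM':
--         position = 2
--     else:
--         position = 1
--     currAtom = line[position]
--     idx = len(currAtom)
--     seen_digit = False
--     for i, c in enumerate(currAtom):
--         if c.isalpha() and seen_digit:
--             idx = i
--             break
--         if c.isnumeric():
--             seen_digit = True
--     return ''.join(c for c in currAtom[:idx] if c.isalnum()), currAtom[idx:]
-- ===== Notes on version B (the rewrite author's own statement) =====
-- stated objective: simpler
-- what changed: B replaces A's four-variable state machine (isNumber/isAtom/Atom/Rest updated per character) by first computing the single break index (first letter after any digit) in one scan, then returning the alnum-filtered prefix and the raw suffix at that index.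
import Mathlib
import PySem

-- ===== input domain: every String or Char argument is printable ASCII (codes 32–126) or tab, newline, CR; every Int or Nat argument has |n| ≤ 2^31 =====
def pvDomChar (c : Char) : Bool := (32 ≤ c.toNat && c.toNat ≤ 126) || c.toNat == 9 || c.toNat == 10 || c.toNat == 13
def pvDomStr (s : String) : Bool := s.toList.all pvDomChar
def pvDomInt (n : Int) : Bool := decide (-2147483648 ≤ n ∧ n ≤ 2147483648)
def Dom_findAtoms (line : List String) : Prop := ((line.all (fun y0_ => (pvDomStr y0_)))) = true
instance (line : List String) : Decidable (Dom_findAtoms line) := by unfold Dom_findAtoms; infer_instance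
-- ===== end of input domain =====

-- B computes the break index in one scan and then takes a slice and a filtered
-- prefix, instead of A's four-variable state machine; objective: simpler.

-- ===== PORT A =====
-- A's for-loop over currAtom with state (isNumber, Atom, isAtom, Rest).
def findAtomsLoop (cs : List Char) (isNumber : Bool) (atom : List Char)
    (isAtom : Bool) (rest : List Char) : List Char × List Char :=
  match cs with
  | [] => (atom, rest)
  | c :: cs' =>
    let isAtom' := if PySem.Chars.isalpha c && isNumber then false else isAtom
    if isAtom' then
      let atom' := if PySem.Chars.isalpha c && !isNumber then atom ++ [c] else atom
      if PySem.Chars.isdigit c then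
        findAtomsLoop cs' true (atom' ++ [c]) isAtom' rest
      else
        findAtomsLoop cs' isNumber atom' isAtom' rest
    else
      findAtomsLoop cs' isNumber atom isAtom' (rest ++ [c])

def findAtoms (line : List String) : String × String :=
  let position : Int :=
    if PySem.List.pyGetD line 0 "" = "HETATM" ∨ PySem.List.pyGetD line 0 "" = "ATOM" then 2 else 1
  let currAtom := PySem.List.pyGetD line position ""
  let res := findAtomsLoop currAtom.toList false [] true []
  (String.ofList res.1, String.ofList res.2)

-- ===== PORT B =====
-- Source B's index scan: first alphabetic character after a digit has been seen.
def splitIdx (cs : List Char) (i : Nat) (seenDigit : Bool) : Nat :=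
  match cs with
  | [] => i
  | c :: cs' =>
    if PySem.Chars.isalpha c && seenDigit then i
    else splitIdx cs' (i + 1) (seenDigit || PySem.Chars.isdigit c)

def findAtoms_alt (line : List String) : String × String :=
  let position : Int :=
    if PySem.List.pyGetD line 0 "" = "HETATM" ∨ PySem.List.pyGetD line 0 "" = "ATOM" then 2 else 1
  let currAtom := (PySem.List.pyGetD line position "").toList
  let idx := splitIdx currAtom 0 false
  (String.ofList ((currAtom.take idx).filter PySem.Chars.isalnum),
   String.ofList (currAtom.drop idx))

-- ===== PRECONDITION & SPEC =====
-- Pre_ excludes exactly the inputs where Python A raises IndexError on line[0] or line[position].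
def Pre_findAtoms (line : List String) : Prop :=
  line ≠ [] ∧
    (if line.headD "" = "HETATM" ∨ line.headD "" = "ATOM"
       then 3 ≤ line.length else 2 ≤ line.length)
instance (line : List String) : Decidable (Pre_findAtoms line) := by unfold Pre_findAtoms; infer_instance

def pvWitness_findAtoms : List String := ["ATOM", "12", "CA1'B"]

def Spec_findAtoms (line : List String) (out : String × String) : Prop := out = findAtoms_alt line
instance (line : List String) (out : String × String) : Decidable (Spec_findAtoms line out) := by unfold Spec_findAtoms; infer_instance

-- ===== CLAIM (what is proved, stated in full; the proofs are below) =====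
def Claim_equal_findAtoms : Prop := ∀ (line : List String), Dom_findAtoms line → Pre_findAtoms line → Spec_findAtoms line (findAtoms line)

-- ===== LEMMAS AND PROOFS =====

-- Letters and digits are disjoint character classes.
theorem isalpha_eq_false_of_isdigit (c : Char) (hd : PySem.Chars.isdigit c = true) :
    PySem.Chars.isalpha c = false := by
  simp [PySem.Chars.isalpha, PySem.Chars.isdigit, PySem.Chars.isupper, PySem.Chars.islower,
    Char.le_def, UInt32.le_iff_toNat_le] at *
  omega

-- splitIdx just adds its accumulator.
theorem splitIdx_succ (cs : List Char) (seen : Bool) (i : Nat) :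
    splitIdx cs (i + 1) seen = splitIdx cs i seen + 1 := by
  induction cs generalizing seen i with
  | nil => rfl
  | cons c cs ih =>
    simp only [splitIdx]
    split
    · rfl
    · exact ih _ _

-- Once isAtom is off, A's loop only appends to rest.
theorem findAtomsLoop_off (cs : List Char) (num : Bool) (atom rest : List Char) :
    findAtomsLoop cs num atom false rest = (atom, rest ++ cs) := by
  induction cs generalizing num rest with
  | nil => simp [findAtomsLoop]
  | cons c cs ih =>
    simp only [findAtomsLoop]
    split
    · simp [ih]
    · simp [ih]

-- While isAtom is on, A's loop produces the filtered prefix up to the break index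
-- and the raw suffix from it.
theorem findAtomsLoop_on (cs : List Char) (num : Bool) (atom : List Char) :
    findAtomsLoop cs num atom true [] =
      (atom ++ (cs.take (splitIdx cs 0 num)).filter PySem.Chars.isalnum,
       cs.drop (splitIdx cs 0 num)) := by
  induction cs generalizing num atom with
  | nil => simp [findAtomsLoop, splitIdx]
  | cons c cs ih =>
    by_cases hb : PySem.Chars.isalpha c && num
    · simp [findAtomsLoop, hb, findAtomsLoop_off, splitIdx]
    · have hsplit : splitIdx (c :: cs) 0 num
          = splitIdx cs 0 (num || PySem.Chars.isdigit c) + 1 := by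
        simp only [splitIdx, hb, Nat.zero_add]
        exact splitIdx_succ cs _ 0
      have halnum : PySem.Chars.isalnum c = (PySem.Chars.isalpha c || PySem.Chars.isdigit c) := by
        simp [PySem.Chars.isalnum, PySem.Chars.isalpha, PySem.Chars.isdigit]
      by_cases hd : PySem.Chars.isdigit c = true
      · have hnum : (num || PySem.Chars.isdigit c) = true := by simp [hd]
        simp only [findAtomsLoop, hb, Bool.false_eq_true, if_false, if_true, hd]
        rw [ih]
        have ha : PySem.Chars.isalpha c = false := isalpha_eq_false_of_isdigit c hd
        simp only [hsplit, List.take_succ_cons, List.drop_succ_cons,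
          List.filter_cons, halnum, hd, Bool.or_true, if_true, ha,
          Bool.false_and, Bool.false_eq_true, if_false]
        simp
      · simp only [findAtomsLoop, hb, Bool.false_eq_true, if_false, if_true, hd]
        rw [ih]
        simp only [hsplit, List.take_succ_cons, List.drop_succ_cons,
          List.filter_cons, halnum, Bool.eq_false_iff.mpr hd, Bool.or_false]
        by_cases ha : PySem.Chars.isalpha c = true
        · have hn : num = false := by
            cases num
            · rfl
            · simp [ha] at hb
          simp [ha, hn]
        · simp [Bool.eq_false_iff.mpr ha]

-- ===== VERDICT (by name: the statement is the Claim_ definition above) =====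
theorem findAtoms_spec : Claim_equal_findAtoms := by
  intro line _ _
  unfold Spec_findAtoms findAtoms findAtoms_alt
  simp only [findAtomsLoop_on, List.nil_append]
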